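-- pv_equiv track=rewrite | github.com/slac-lcls/lcls2 | psdaq/psdaq/app/node_usage.py | _format_lane_section
-- ===== SOURCE A (Python) =====
-- from typing import List, Dict, Any, Set, Tuple
--
-- def _format_lane_section(lane_usage: List[Tuple[str, str, str, str]]) -> str:
--     """Format the lane usage section"""
--     lines = []
--     lines.append("┌" + "─" * 78 + "┐")
--     lines.append("│ " + "Lane Usage by Host (DRP nodes only)".ljust(77) + "│")
--     lines.append("├" + "─" * 20 + "┬" + "─" * 12 + "┬" + "─" * 8 + "┬" + "─" * 36 + "┤")
--     lines.append("│ " + "Host".ljust(19) + "│ " + "Device".ljust(11) + "│ " + "Lane".ljust(7) + "│ " + "Process ID".ljust(35) + "│")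
--     lines.append("├" + "─" * 20 + "┼" + "─" * 12 + "┼" + "─" * 8 + "┼" + "─" * 36 + "┤")
--
--     prev_host = None
--     prev_device = None
--     for host, device, lane, proc_id in lane_usage:
--         # Show host only on first row for that host
--         show_host = host if host != prev_host else ''
--         # Show device only on first row for that host+device combo
--         show_device = device if (host != prev_host or device != prev_device) else ''
--
--         lines.append(f"│ {show_host[:19].ljust(19)}│ {show_device[:11].ljust(11)}│ {lane[:7].ljust(7)}│ {proc_id[:35].ljust(35)}│")
--
--         prev_host = host
--         prev_device = device
--
--     lines.append("└" + "─" * 20 + "┴" + "─" * 12 + "┴" + "─" * 8 + "┴" + "─" * 36 + "┘")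
--
--     return "\n".join(lines)
-- ===== SOURCE B (Python) =====
-- from itertools import groupby
-- from typing import List, Tuple
--
--
-- def _cell(s: str, n: int) -> str:
--     return s[:n].ljust(n)
--
--
-- def _row(host: str, device: str, lane: str, proc_id: str) -> str:
--     return ("│ " + _cell(host, 19) + "│ " + _cell(device, 11)
--             + "│ " + _cell(lane, 7) + "│ " + _cell(proc_id, 35) + "│")
--
--
-- def _dev_rows(show_host: bool, rows: List[Tuple[str, str, str, str]]) -> List[str]:
--     (host, device, lane, proc_id), rest = rows[0], rows[1:]
--     return ([_row(host if show_host else '', device, lane, proc_id)]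
--             + [_row('', '', r[2], r[3]) for r in rest])
--
--
-- def _format_lane_section(lane_usage: List[Tuple[str, str, str, str]]) -> str:
--     """Format the lane usage section"""
--     body = []
--     for _, hgrp in groupby(lane_usage, key=lambda r: r[0]):
--         dgrps = [list(g) for _, g in groupby(hgrp, key=lambda r: r[1])]
--         body += _dev_rows(True, dgrps[0])
--         for dg in dgrps[1:]:
--             body += _dev_rows(False, dg)
--     top = [
--         "┌" + "─" * 78 + "┐",
--         "│ " + "Lane Usage by Host (DRP nodes only)".ljust(77) + "│",
--         "├" + "─" * 20 + "┬" + "─" * 12 + "┬" + "─" * 8 + "┬" + "─" * 36 + "┤",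
--         "│ " + "Host".ljust(19) + "│ " + "Device".ljust(11) + "│ " + "Lane".ljust(7) + "│ " + "Process ID".ljust(35) + "│",
--         "├" + "─" * 20 + "┼" + "─" * 12 + "┼" + "─" * 8 + "┼" + "─" * 36 + "┤",
--     ]
--     bottom = ["└" + "─" * 20 + "┴" + "─" * 12 + "┴" + "─" * 8 + "┴" + "─" * 36 + "┘"]
--     return "\n".join(top + body + bottom)
-- ===== Notes on version B (the rewrite author's own statement) =====
-- stated objective: alternative
-- what changed: Replaced the stateful flat loop carrying prev_host/prev_device across iterations with an itertools.groupby decomposition: adjacent rows are grouped by host, each host group subgrouped by device, and the host/device cells are emitted only on the first row of their group.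
import Mathlib
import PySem

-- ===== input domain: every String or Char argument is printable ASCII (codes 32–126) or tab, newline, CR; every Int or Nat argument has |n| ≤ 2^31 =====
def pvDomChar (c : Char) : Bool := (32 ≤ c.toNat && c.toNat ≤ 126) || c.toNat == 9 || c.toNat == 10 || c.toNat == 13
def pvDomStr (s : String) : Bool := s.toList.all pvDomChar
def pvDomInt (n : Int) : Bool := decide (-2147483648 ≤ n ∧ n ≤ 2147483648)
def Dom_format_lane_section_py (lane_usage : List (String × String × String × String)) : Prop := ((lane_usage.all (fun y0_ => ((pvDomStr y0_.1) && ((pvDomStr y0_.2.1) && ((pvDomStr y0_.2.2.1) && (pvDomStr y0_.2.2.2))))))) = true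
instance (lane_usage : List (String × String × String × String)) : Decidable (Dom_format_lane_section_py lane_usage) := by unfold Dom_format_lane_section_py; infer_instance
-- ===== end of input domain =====

-- B replaces A's stateful flat loop (prev_host/prev_device carried across iterations) by an
-- itertools.groupby decomposition: adjacent runs grouped by host, subgrouped by device. Same output.

-- ===== PORT A =====
-- shared cell builder, s[:n].ljust(n): slice, then pad with ' ' to width n (ljust ported by hand; exact per code point)
def pvCell (s : String) (n : Nat) : String :=
  let t := PySem.Str.slice s none (some (n : Int))
  t ++ String.ofList (List.replicate (n - t.toList.length) ' ')

-- s.ljust(n) without the slice (header cells; ljust ported by hand; exact per code point)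
def pvLjust (s : String) (n : Nat) : String :=
  s ++ String.ofList (List.replicate (n - s.toList.length) ' ')

-- "─" * n
def pvHLine (n : Nat) : String := String.ofList (List.replicate n '─')

def pvHeaderLines : List String :=
  [ "┌" ++ pvHLine 78 ++ "┐",
    "│ " ++ pvLjust "Lane Usage by Host (DRP nodes only)" 77 ++ "│",
    "├" ++ pvHLine 20 ++ "┬" ++ pvHLine 12 ++ "┬" ++ pvHLine 8 ++ "┬" ++ pvHLine 36 ++ "┤",
    "│ " ++ pvLjust "Host" 19 ++ "│ " ++ pvLjust "Device" 11 ++ "│ " ++ pvLjust "Lane" 7 ++ "│ " ++ pvLjust "Process ID" 35 ++ "│",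
    "├" ++ pvHLine 20 ++ "┼" ++ pvHLine 12 ++ "┼" ++ pvHLine 8 ++ "┼" ++ pvHLine 36 ++ "┤" ]

def pvFooterLine : String :=
  "└" ++ pvHLine 20 ++ "┴" ++ pvHLine 12 ++ "┴" ++ pvHLine 8 ++ "┴" ++ pvHLine 36 ++ "┘"

-- the f-string of a body row
def pvRowLine (h d l p : String) : String :=
  "│ " ++ pvCell h 19 ++ "│ " ++ pvCell d 11 ++ "│ " ++ pvCell l 7 ++ "│ " ++ pvCell p 35 ++ "│"

def format_lane_section_py (lane_usage : List (String × String × String × String)) : String :=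
  PySem.Str.join "\n"
    ((lane_usage.foldl
      (fun (st : Option String × Option String × List String) r =>
        let prev_host := st.1
        let prev_device := st.2.1
        let lines := st.2.2
        let host := r.1; let device := r.2.1; let lane := r.2.2.1; let proc_id := r.2.2.2
        let show_host := if (some host != prev_host) then host else ""
        let show_device := if (some host != prev_host || some device != prev_device) then device else ""
        (some host, some device, lines ++ [pvRowLine show_host show_device lane proc_id]))
      (none, none, pvHeaderLines)).2.2 ++ [pvFooterLine])

-- ===== PORT B =====
-- itertools.groupby(xs, key): maximal adjacent runs of equal key (hand port of the stdlib call)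
def pvGroupBy {α : Type} (key : α → String) : List α → List (List α)
  | [] => []
  | x :: xs =>
      (x :: xs.takeWhile (fun r => key r == key x)) :: pvGroupBy key (xs.dropWhile (fun r => key r == key x))
termination_by l => l.length
decreasing_by
  simp only [List.length_cons]
  exact Nat.lt_succ_of_le (List.length_dropWhile_le _ _)

-- _dev_rows: rows of one device group; host cell only when show_host, device cell only on the first row
def pvDevRows (show_host : Bool) : List (String × String × String × String) → List String
  | [] => []
  | r :: rest =>
      pvRowLine (if show_host then r.1 else "") r.2.1 r.2.2.1 r.2.2.2
        :: rest.map (fun r => pvRowLine "" "" r.2.2.1 r.2.2.2)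

-- the body loop: host groups, then device groups; first device group of a host group carries the host cell
def pvBodyB (lane_usage : List (String × String × String × String)) : List String :=
  (pvGroupBy (fun r => r.1) lane_usage).flatMap (fun hgrp =>
    match pvGroupBy (fun r => r.2.1) hgrp with
    | [] => []
    | dg0 :: dgs => pvDevRows true dg0 ++ dgs.flatMap (pvDevRows false))

def format_lane_section_py_alt (lane_usage : List (String × String × String × String)) : String :=
  PySem.Str.join "\n" (pvHeaderLines ++ pvBodyB lane_usage ++ [pvFooterLine])

-- ===== PRECONDITION & SPEC =====
def Spec_format_lane_section_py (lane_usage : List (String × String × String × String)) (out : String) : Prop := out = format_lane_section_py_alt lane_usage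
instance (lane_usage : List (String × String × String × String)) (out : String) : Decidable (Spec_format_lane_section_py lane_usage out) := by unfold Spec_format_lane_section_py; infer_instance

-- ===== CLAIM (what is proved, stated in full; the proofs are below) =====
def Claim_equal_format_lane_section_py : Prop := ∀ (lane_usage : List (String × String × String × String)), Dom_format_lane_section_py lane_usage → Spec_format_lane_section_py lane_usage (format_lane_section_py lane_usage)

-- ===== LEMMAS AND PROOFS =====

-- A's loop as a direct recursion on the row list (proof-side view of the foldl)
def pvARows (ph pd : Option String) : List (String × String × String × String) → List String
  | [] => []
  | r :: t =>
      pvRowLine (if (some r.1 != ph) then r.1 else "")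
                (if (some r.1 != ph || some r.2.1 != pd) then r.2.1 else "") r.2.2.1 r.2.2.2
        :: pvARows (some r.1) (some r.2.1) t

-- device key of the last row of g, pd if g is empty (A's prev_device after consuming g)
def pvLastDev (g : List (String × String × String × String)) (pd : Option String) : Option String :=
  match g.getLast? with
  | none => pd
  | some r => some r.2.1

theorem pvFoldA (lu : List (String × String × String × String)) :
    ∀ (ph pd : Option String) (acc : List String),
    (lu.foldl
      (fun (st : Option String × Option String × List String) r =>
        let prev_host := st.1
        let prev_device := st.2.1
        let lines := st.2.2
        let host := r.1; let device := r.2.1; let lane := r.2.2.1; let proc_id := r.2.2.2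
        let show_host := if (some host != prev_host) then host else ""
        let show_device := if (some host != prev_host || some device != prev_device) then device else ""
        (some host, some device, lines ++ [pvRowLine show_host show_device lane proc_id]))
      (ph, pd, acc)).2.2 = acc ++ pvARows ph pd lu := by
  induction lu with
  | nil => intro ph pd acc; simp [pvARows]
  | cons r t ih =>
      intro ph pd acc
      simp only [List.foldl_cons, pvARows]
      rw [ih]
      simp

theorem pvLastDevCons (y : String × String × String × String)
    (ys : List (String × String × String × String)) (pd : Option String) :
    pvLastDev (y :: ys) pd = pvLastDev ys (some y.2.1) := by
  cases ys with
  | nil => simp [pvLastDev]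
  | cons z zs =>
      unfold pvLastDev
      rw [List.getLast?_cons_cons]
      cases hrl : (z :: zs).getLast? with
      | none => simp at hrl
      | some r => rfl

theorem pvLastDevAppend (l1 l2 : List (String × String × String × String)) (pd : Option String) :
    pvLastDev (l1 ++ l2) pd = pvLastDev l2 (pvLastDev l1 pd) := by
  induction l1 generalizing pd with
  | nil => simp [pvLastDev]
  | cons y t ih => rw [List.cons_append, pvLastDevCons, ih, pvLastDevCons]

theorem pvLastDevRun (run : List (String × String × String × String)) (d : String)
    (hr : ∀ r ∈ run, r.2.1 = d) : pvLastDev run (some d) = some d := by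
  induction run with
  | nil => simp [pvLastDev]
  | cons y t ih =>
      rw [pvLastDevCons, hr y List.mem_cons_self]
      exact ih (fun r h => hr r (List.mem_cons_of_mem _ h))

theorem pvBlankRun (run : List (String × String × String × String)) :
    ∀ (rest : List (String × String × String × String)) (h d : String),
    (∀ r ∈ run, r.1 = h ∧ r.2.1 = d) →
    pvARows (some h) (some d) (run ++ rest)
      = run.map (fun r => pvRowLine "" "" r.2.2.1 r.2.2.2) ++ pvARows (some h) (some d) rest := by
  induction run with
  | nil => intro rest h d _; simp
  | cons r t ih =>
      intro rest h d hall
      obtain ⟨hh, hd⟩ := hall r List.mem_cons_self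
      simp only [List.cons_append, pvARows, hh, hd, List.map_cons,
        bne_self_eq_false, Bool.or_self, Bool.false_eq_true, if_false, List.cons.injEq]
      exact ⟨trivial, ih rest h d (fun x hx => hall x (List.mem_cons_of_mem _ hx))⟩

theorem pvDropWhileHead {α : Type} (p : α → Bool) (l : List α) (y : α) (t : List α)
    (h : l.dropWhile p = y :: t) : p y = false := by
  induction l with
  | nil => simp at h
  | cons a l' ih =>
      rw [List.dropWhile_cons] at h
      by_cases hp : p a = true
      · rw [if_pos hp] at h; exact ih h
      · rw [if_neg hp] at h
        cases h; simpa using hp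

theorem pvDevAux : ∀ (n : Nat) (g : List (String × String × String × String)),
    g.length ≤ n → ∀ (rest : List (String × String × String × String)) (h : String) (pd : Option String),
    (∀ r ∈ g, r.1 = h) → (∀ y t, g = y :: t → some y.2.1 ≠ pd) →
    pvARows (some h) pd (g ++ rest)
      = (pvGroupBy (fun r => r.2.1) g).flatMap (pvDevRows false)
          ++ pvARows (some h) (pvLastDev g pd) rest := by
  intro n
  induction n with
  | zero =>
      intro g hg rest h pd _ _
      have hnil : g = [] := List.eq_nil_of_length_eq_zero (Nat.le_zero.mp hg)
      subst hnil; simp [pvGroupBy, pvLastDev]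
  | succ n ih =>
      intro g hg rest h pd hall hpd
      cases g with
      | nil => simp [pvGroupBy, pvLastDev]
      | cons y ys =>
          have hy1 : y.1 = h := hall y List.mem_cons_self
          have hb : (some y.2.1 != pd) = true := bne_iff_ne.mpr (hpd y ys rfl)
          have hsplit : ys.takeWhile (fun r => r.2.1 == y.2.1) ++ ys.dropWhile (fun r => r.2.1 == y.2.1) = ys :=
            List.takeWhile_append_dropWhile
          have hrunmem : ∀ r ∈ ys.takeWhile (fun r => r.2.1 == y.2.1), r.1 = h ∧ r.2.1 = y.2.1 := by
            intro r hr
            refine ⟨hall r (List.mem_cons_of_mem _ ((List.takeWhile_sublist _).subset hr)), ?_⟩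
            have := List.mem_takeWhile_imp hr
            simpa using this
          have hL : pvARows (some h) pd ((y :: ys) ++ rest)
              = pvRowLine "" y.2.1 y.2.2.1 y.2.2.2 :: pvARows (some h) (some y.2.1) (ys ++ rest) := by
            simp [pvARows, hy1, hb]
          have hblank : pvARows (some h) (some y.2.1) (ys ++ rest)
              = (ys.takeWhile (fun r => r.2.1 == y.2.1)).map (fun r => pvRowLine "" "" r.2.2.1 r.2.2.2)
                  ++ pvARows (some h) (some y.2.1) (ys.dropWhile (fun r => r.2.1 == y.2.1) ++ rest) := by
            conv_lhs => rw [← hsplit]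
            rw [List.append_assoc]
            exact pvBlankRun _ _ _ _ hrunmem
          have hld : pvLastDev (y :: ys) pd
              = pvLastDev (ys.dropWhile (fun r => r.2.1 == y.2.1)) (some y.2.1) := by
            rw [pvLastDevCons]
            conv_lhs => rw [← hsplit]
            rw [pvLastDevAppend, pvLastDevRun _ _ (fun r hr => (hrunmem r hr).2)]
          rw [hL, hblank, hld, pvGroupBy]
          cases hre : ys.dropWhile (fun r => r.2.1 == y.2.1) with
          | nil => simp [pvGroupBy, pvLastDev, pvDevRows]
          | cons z zs =>
              have hlen : (z :: zs).length ≤ n := by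
                have h1 := List.length_dropWhile_le (fun r => r.2.1 == y.2.1) ys
                rw [hre] at h1
                have h2 : ys.length ≤ n := by simpa using Nat.le_of_succ_le_succ (by simpa using hg)
                omega
              have hmem : ∀ r ∈ z :: zs, r.1 = h := by
                intro r hr
                rw [← hre] at hr
                exact hall r (List.mem_cons_of_mem _ ((List.dropWhile_sublist _).subset hr))
              have hzne : ∀ y' t', (z :: zs) = y' :: t' → some y'.2.1 ≠ some y.2.1 := by
                intro y' t' he
                cases he
                have := pvDropWhileHead _ ys z zs hre
                simpa using this
              rw [ih (z :: zs) hlen rest h (some y.2.1) hmem hzne]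
              simp [pvDevRows]

theorem pvHostGroup (y : String × String × String × String)
    (ys rest : List (String × String × String × String)) (h : String) (ph pd : Option String)
    (hall : ∀ r ∈ y :: ys, r.1 = h) (hph : ph ≠ some h) :
    pvARows ph pd ((y :: ys) ++ rest)
      = pvDevRows true (y :: ys.takeWhile (fun r => r.2.1 == y.2.1))
          ++ (pvGroupBy (fun r => r.2.1) (ys.dropWhile (fun r => r.2.1 == y.2.1))).flatMap (pvDevRows false)
          ++ pvARows (some h) (pvLastDev (y :: ys) pd) rest := by
  have hy1 : y.1 = h := hall y List.mem_cons_self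
  have hb : (some h != ph) = true := bne_iff_ne.mpr (fun hc => hph hc.symm)
  have hsplit : ys.takeWhile (fun r => r.2.1 == y.2.1) ++ ys.dropWhile (fun r => r.2.1 == y.2.1) = ys :=
    List.takeWhile_append_dropWhile
  have hrunmem : ∀ r ∈ ys.takeWhile (fun r => r.2.1 == y.2.1), r.1 = h ∧ r.2.1 = y.2.1 := by
    intro r hr
    refine ⟨hall r (List.mem_cons_of_mem _ ((List.takeWhile_sublist _).subset hr)), ?_⟩
    have := List.mem_takeWhile_imp hr
    simpa using this
  have hL : pvARows ph pd ((y :: ys) ++ rest)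
      = pvRowLine h y.2.1 y.2.2.1 y.2.2.2 :: pvARows (some h) (some y.2.1) (ys ++ rest) := by
    simp [pvARows, hy1, hb]
  have hblank : pvARows (some h) (some y.2.1) (ys ++ rest)
      = (ys.takeWhile (fun r => r.2.1 == y.2.1)).map (fun r => pvRowLine "" "" r.2.2.1 r.2.2.2)
          ++ pvARows (some h) (some y.2.1) (ys.dropWhile (fun r => r.2.1 == y.2.1) ++ rest) := by
    conv_lhs => rw [← hsplit]
    rw [List.append_assoc]
    exact pvBlankRun _ _ _ _ hrunmem
  have hld : pvLastDev (y :: ys) pd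
      = pvLastDev (ys.dropWhile (fun r => r.2.1 == y.2.1)) (some y.2.1) := by
    rw [pvLastDevCons]
    conv_lhs => rw [← hsplit]
    rw [pvLastDevAppend, pvLastDevRun _ _ (fun r hr => (hrunmem r hr).2)]
  rw [hL, hblank, hld]
  cases hre : ys.dropWhile (fun r => r.2.1 == y.2.1) with
  | nil => simp [pvGroupBy, pvLastDev, pvDevRows, hy1]
  | cons z zs =>
      have hmem : ∀ r ∈ z :: zs, r.1 = h := by
        intro r hr
        rw [← hre] at hr
        exact hall r (List.mem_cons_of_mem _ ((List.dropWhile_sublist _).subset hr))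
      have hzne : ∀ y' t', (z :: zs) = y' :: t' → some y'.2.1 ≠ some y.2.1 := by
        intro y' t' he
        cases he
        have := pvDropWhileHead _ ys z zs hre
        simpa using this
      rw [pvDevAux (z :: zs).length (z :: zs) (le_refl _) rest h (some y.2.1) hmem hzne]
      simp [pvDevRows, hy1]

theorem pvMainAux : ∀ (n : Nat) (lu : List (String × String × String × String)),
    lu.length ≤ n → ∀ (ph pd : Option String),
    (∀ y t, lu = y :: t → ph ≠ some y.1) →
    pvARows ph pd lu = pvBodyB lu := by
  intro n
  induction n with
  | zero =>
      intro lu hl _ _ _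
      have hnil : lu = [] := List.eq_nil_of_length_eq_zero (Nat.le_zero.mp hl)
      subst hnil; simp [pvARows, pvBodyB, pvGroupBy]
  | succ n ih =>
      intro lu hl ph pd hph
      cases lu with
      | nil => simp [pvARows, pvBodyB, pvGroupBy]
      | cons x xs =>
          have hsplit : xs.takeWhile (fun r => r.1 == x.1) ++ xs.dropWhile (fun r => r.1 == x.1) = xs :=
            List.takeWhile_append_dropWhile
          have hall : ∀ r ∈ x :: xs.takeWhile (fun r => r.1 == x.1), r.1 = x.1 := by
            intro r hr
            rcases List.mem_cons.mp hr with h | h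
            · rw [h]
            · have := List.mem_takeWhile_imp h; simpa using this
          have hlen : (xs.dropWhile (fun r => r.1 == x.1)).length ≤ n := by
            have h1 := List.length_dropWhile_le (fun r => r.1 == x.1) xs
            have h2 : xs.length ≤ n := Nat.le_of_succ_le_succ (by simpa using hl)
            omega
          have hcond : ∀ y t, xs.dropWhile (fun r => r.1 == x.1) = y :: t → some x.1 ≠ some y.1 := by
            intro y t he hc
            have := pvDropWhileHead _ xs y t he
            rw [← Option.some.inj hc] at this
            simp at this
          have hcons : (x :: xs) = (x :: xs.takeWhile (fun r => r.1 == x.1))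
              ++ xs.dropWhile (fun r => r.1 == x.1) := by
            rw [List.cons_append, hsplit]
          conv_lhs => rw [hcons]
          rw [pvHostGroup x _ _ x.1 ph pd hall (fun hc => hph x xs rfl hc)]
          rw [ih _ hlen (some x.1) (pvLastDev (x :: xs.takeWhile (fun r => r.1 == x.1)) pd) hcond]
          conv_rhs => rw [pvBodyB, pvGroupBy]
          rw [List.flatMap_cons, pvGroupBy]
          simp [pvBodyB, List.append_assoc]

-- ===== VERDICT (by name: the statement is the Claim_ definition above) =====
theorem format_lane_section_py_spec : Claim_equal_format_lane_section_py := by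
  intro lu _
  unfold Spec_format_lane_section_py format_lane_section_py format_lane_section_py_alt
  rw [pvFoldA lu none none pvHeaderLines]
  rw [pvMainAux lu.length lu (le_refl _) none none (by intro y t _ hc; cases hc)]
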